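-- pv_equiv track=rewrite | github.com/SodaVolcano/leetcode-grind | solutions/2610.convert-an-array-into-a-2-d-array-with-conditions.py | dict_approach2
-- ===== SOURCE A (Python) =====
-- def dict_approach2(nums: list[int]) -> list[list[int]]:
--     # Great runtime ~86%, memory ~50%
--     # Count up frequency of number and use frequency to index 2D answer array
--     counts = {}
--     ans = [[]]
--
--     for i in nums:
--         counts[i] = 0 if i not in counts.keys() else counts[i] + 1
--         # counts == number of list in ans
--         if counts[i] == len(ans):
--             ans.append([i])
--         else:
--             ans[counts[i]].append(i)
--     return ans
-- ===== SOURCE B (Python) =====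
-- def dict_approach2(nums: list[int]) -> list[list[int]]:
--     # Greedy first-fit: put each number into the first row that doesn't contain it yet.
--     ans = [[]]
--     for x in nums:
--         for row in ans:
--             if x not in row:
--                 row.append(x)
--                 break
--         else:
--             ans.append([x])
--     return ans
-- ===== Notes on version B (the rewrite author's own statement) =====
-- stated objective: alternative
-- what changed: Replaced the occurrence-counting dict that indexes rows with a greedy first-fit scan: each number is appended to the first existing row not already containing it (a new row if none), with no counter maintained.
import Mathlib
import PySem

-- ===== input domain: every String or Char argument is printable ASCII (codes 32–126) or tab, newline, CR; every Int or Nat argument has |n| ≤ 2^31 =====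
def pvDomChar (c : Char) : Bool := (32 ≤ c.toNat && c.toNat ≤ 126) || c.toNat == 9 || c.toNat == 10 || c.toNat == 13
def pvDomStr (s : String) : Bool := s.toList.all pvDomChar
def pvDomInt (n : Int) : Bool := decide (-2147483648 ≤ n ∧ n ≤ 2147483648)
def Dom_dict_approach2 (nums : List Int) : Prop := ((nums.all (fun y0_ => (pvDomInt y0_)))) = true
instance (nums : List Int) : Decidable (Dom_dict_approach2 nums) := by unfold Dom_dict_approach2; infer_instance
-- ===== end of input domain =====

-- B replaces A's occurrence-counting dict by a greedy first-fit row scan (alternative decomposition, not faster).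

-- ===== PORT A =====
-- one loop iteration of A; ans[counts[i]] is always in range (counts[i] < len(ans)), ported with pyGetD/pySetD
def dictStepA (st : PySem.Dict Int Int × List (List Int)) (i : Int) :
    PySem.Dict Int Int × List (List Int) :=
  let v : Int := match st.1.get? i with
    | none => 0          -- "0 if i not in counts.keys()"
    | some c => c + 1    -- "else counts[i] + 1"
  let counts := st.1.insert i v
  if v = (st.2.length : Int) then
    (counts, st.2 ++ [[i]])
  else
    (counts, PySem.List.pySetD st.2 v (PySem.List.pyGetD st.2 v [] ++ [i]))

def dict_approach2 (nums : List Int) : List (List Int) :=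
  (nums.foldl dictStepA (PySem.Dict.empty, [[]])).2

-- ===== PORT B =====
-- append x to the first row not containing x; if every row contains x, start a new row
def placeB (x : Int) : List (List Int) → List (List Int)
  | [] => [[x]]
  | r :: rs => if x ∈ r then r :: placeB x rs else (r ++ [x]) :: rs

def dict_approach2_alt (nums : List Int) : List (List Int) :=
  nums.foldl (fun ans x => placeB x ans) [[]]

-- ===== PRECONDITION & SPEC =====
def Spec_dict_approach2 (nums : List Int) (out : List (List Int)) : Prop := out = dict_approach2_alt nums
instance (nums : List Int) (out : List (List Int)) : Decidable (Spec_dict_approach2 nums out) := by unfold Spec_dict_approach2; infer_instance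

-- ===== CLAIM (what is proved, stated in full; the proofs are below) =====
def Claim_equal_dict_approach2 : Prop := ∀ (nums : List Int), Dom_dict_approach2 nums → Spec_dict_approach2 nums (dict_approach2 nums)

-- ===== LEMMAS AND PROOFS =====

/-- number of occurrences of `v` seen so far, as A's dict records it -/
def occA (counts : PySem.Dict Int Int) (v : Int) : Int :=
  match counts.get? v with
  | none => 0
  | some c => c + 1

/-- invariant tying A's counter dict to the shared answer rows -/
def InvA (counts : PySem.Dict Int Int) (ans : List (List Int)) : Prop :=
  ∀ v : Int, 0 ≤ occA counts v ∧ occA counts v ≤ (ans.length : Int) ∧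
    ∀ j : Nat, j < ans.length → (v ∈ ans.getD j [] ↔ (j : Int) < occA counts v)

lemma occA_insert (counts : PySem.Dict Int Int) (i w v : Int) :
    occA (counts.insert i v) w = if w = i then v + 1 else occA counts w := by
  unfold occA
  rw [PySem.Dict.get?_insert]
  split_ifs <;> rfl

lemma placeB_all_mem (x : Int) (rows : List (List Int)) (h : ∀ r ∈ rows, x ∈ r) :
    placeB x rows = rows ++ [[x]] := by
  induction rows with
  | nil => rfl
  | cons r rs ih =>
    simp only [placeB, if_pos (h r (by simp))]
    rw [ih (fun r hr => h r (by simp [hr]))]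
    simp

lemma placeB_first_free (x : Int) (rows : List (List Int)) (c : Nat) (hc : c < rows.length)
    (h : ∀ j : Nat, j < rows.length → (x ∈ rows.getD j [] ↔ j < c)) :
    placeB x rows = rows.set c (rows.getD c [] ++ [x]) := by
  induction rows generalizing c with
  | nil => simp at hc
  | cons r rs ih =>
    cases c with
    | zero =>
      have hx : x ∉ r := by
        have := h 0 (by simp)
        simpa using this
      simp [placeB, hx]
    | succ c =>
      have hx : x ∈ r := by
        have := h 0 (by simp)
        simpa using this
      simp only [placeB, if_pos hx]
      rw [ih c (by simpa using hc) (fun j hj => by simpa using h (j + 1) (by simpa using hj))]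
      rfl

lemma dictStepA_eq (counts : PySem.Dict Int Int) (ans : List (List Int)) (i : Int)
    (h : InvA counts ans) :
    (dictStepA (counts, ans) i).2 = placeB i ans ∧
      InvA (dictStepA (counts, ans) i).1 (dictStepA (counts, ans) i).2 := by
  obtain ⟨h0, hle, hmem⟩ := h i
  have hvdef : occA counts i = (match counts.get? i with | none => (0:Int) | some c => c + 1) := rfl
  unfold dictStepA
  simp only [← hvdef]
  set v : Int := occA counts i with hv
  by_cases hcase : v = (ans.length : Int)
  · -- new row appended
    rw [if_pos hcase]
    constructor
    · have hall : ∀ r ∈ ans, i ∈ r := by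
        intro r hr
        obtain ⟨j, hj, rfl⟩ := List.mem_iff_getElem.mp hr
        have := (hmem j hj).mpr (by omega)
        simpa [List.getD_eq_getElem?_getD, List.getElem?_eq_getElem hj] using this
      rw [placeB_all_mem i ans hall]
    · intro w
      obtain ⟨w0, wle, wmem⟩ := h w
      rw [occA_insert]
      by_cases hw : w = i
      · subst hw
        rw [if_pos rfl]
        refine ⟨by omega, by simp; omega, ?_⟩
        intro j hj
        simp only [List.length_append, List.length_cons, List.length_nil] at hj
        rcases Nat.lt_or_ge j ans.length with hj' | hj'
        · rw [List.getD_append _ _ _ _ hj']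
          constructor
          · intro _; omega
          · intro _; exact (hmem j hj').mpr (by omega)
        · have hje : j = ans.length := by omega
          subst hje
          simp only [List.getD_eq_getElem?_getD,
            List.getElem?_append_right (le_refl ans.length), Nat.sub_self]
          simp
          omega
      · rw [if_neg hw]
        refine ⟨w0, by simp; omega, ?_⟩
        intro j hj
        simp only [List.length_append, List.length_cons, List.length_nil] at hj
        rcases Nat.lt_or_ge j ans.length with hj' | hj'
        · rw [List.getD_append _ _ _ _ hj']
          exact wmem j hj'
        · have hje : j = ans.length := by omega
          subst hje
          simp only [List.getD_eq_getElem?_getD,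
            List.getElem?_append_right (le_refl ans.length), Nat.sub_self]
          simp [hw]
          omega
  · -- placed inside an existing row
    rw [if_neg hcase]
    have hvlt : v < (ans.length : Int) := lt_of_le_of_ne hle hcase
    have hv0 : 0 ≤ v := h0
    have hcnat : v.toNat < ans.length := by omega
    have hset : PySem.List.pySetD ans v (PySem.List.pyGetD ans v [] ++ [i]) =
        ans.set v.toNat (ans.getD v.toNat [] ++ [i]) := by
      rw [PySem.List.pySetD_of_nonneg _ _ hv0, PySem.List.pyGetD_eq_getElem _ _ hv0 hvlt]
      simp [List.getD_eq_getElem?_getD, List.getElem?_eq_getElem hcnat]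
    have hmem' : ∀ j : Nat, j < ans.length → (i ∈ ans.getD j [] ↔ j < v.toNat) := by
      intro j hj
      rw [hmem j hj]
      omega
    constructor
    · rw [hset, placeB_first_free i ans v.toNat hcnat hmem']
    · intro w
      obtain ⟨w0, wle, wmem⟩ := h w
      rw [occA_insert, hset]
      have hlen : (ans.set v.toNat (ans.getD v.toNat [] ++ [i])).length = ans.length := by simp
      by_cases hw : w = i
      · subst hw
        rw [if_pos rfl]
        refine ⟨by omega, by rw [hlen]; omega, ?_⟩
        intro j hj
        rw [hlen] at hj
        by_cases hji : j = v.toNat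
        · subst hji
          simp only [List.getD_eq_getElem?_getD, List.getElem?_set_self hcnat, Option.getD_some]
          simp
          omega
        · rw [List.getD_eq_getElem?_getD, List.getElem?_set_ne (fun he => hji he.symm),
            ← List.getD_eq_getElem?_getD]
          rw [hmem j hj]
          omega
      · rw [if_neg hw]
        refine ⟨w0, by rw [hlen]; omega, ?_⟩
        intro j hj
        rw [hlen] at hj
        by_cases hji : j = v.toNat
        · subst hji
          rw [List.getD_eq_getElem?_getD, List.getElem?_set_self hcnat, Option.getD_some,
            List.mem_append, List.mem_singleton]
          have hwm := wmem v.toNat hcnat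
          constructor
          · rintro (hm | rfl)
            · exact hwm.mp hm
            · exact absurd rfl hw
          · intro hlt
            exact Or.inl (hwm.mpr hlt)
        · rw [List.getD_eq_getElem?_getD, List.getElem?_set_ne (fun he => hji he.symm),
            ← List.getD_eq_getElem?_getD]
          exact wmem j hj

lemma foldl_eq (l : List Int) :
    ∀ (counts : PySem.Dict Int Int) (ans : List (List Int)), InvA counts ans →
      (l.foldl dictStepA (counts, ans)).2 = l.foldl (fun ans x => placeB x ans) ans := by
  induction l with
  | nil => intro _ _ _; rfl
  | cons x xs ih =>
    intro counts ans hinv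
    obtain ⟨heq, hinv'⟩ := dictStepA_eq counts ans x hinv
    simp only [List.foldl_cons]
    rw [show dictStepA (counts, ans) x = ((dictStepA (counts, ans) x).1, (dictStepA (counts, ans) x).2) from rfl,
      heq] at *
    exact ih _ _ (by rwa [← heq])

lemma InvA_init : InvA PySem.Dict.empty [[]] := by
  intro v
  refine ⟨le_refl 0, by simp [occA, PySem.Dict.get?_empty], ?_⟩
  intro j hj
  have : j = 0 := by simp at hj; omega
  subst this
  simp [occA, PySem.Dict.get?_empty]

-- ===== VERDICT (by name: the statement is the Claim_ definition above) =====
theorem dict_approach2_spec : Claim_equal_dict_approach2 := by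
  intro nums _
  unfold Spec_dict_approach2 dict_approach2 dict_approach2_alt
  exact foldl_eq nums PySem.Dict.empty [[]] InvA_init
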